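-- pv_equiv track=rewrite | github.com/ryangrg/corner-maze-analysis | scripts/build_pandas_table.py | reversal_block_scores
-- ===== SOURCE A (Python) =====
-- def reversal_block_scores(trial_scores):
--     """
--     Aggregate reversal performance into consecutive blocks of eight trials.
--     Converts a trial-by-trial score vector into block-level correctness counts, while capping
--     later blocks based on performance stability (>=7 correct the block before).
--
--     Parameters
--     ----------
--     trial_scores : iterable
--         Sequence where 0 marks a correct trial and non-zero marks an error.
--
--     Returns
--     -------
--     list
--         Ten-element list, each entry containing the number of correct trials per block.
--
--     Behavior / Notes
--     ----------------
--     - The first two blocks correspond to pre-probe training and are included unmodified.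
--     - Once a block achieves >=7 correct trials (after block index 2), subsequent blocks are
--       forced to the maximum (8) to reflect asymptotic performance.
--     """
--     trial_scores = list(trial_scores)
--     block_scores = []
--     max_correct_trials = 8
--     number_of_blocks = 10
--     for i in range(number_of_blocks):
--         block = trial_scores[i*8:(i+1)*8]
--         correct_trials = block.count(0)
--         if i > 2 and block_scores[-1] >= 7:
--             block_scores.append(max_correct_trials)
--         else:
--             block_scores.append(correct_trials)
--     return block_scores
-- ===== SOURCE B (Python) =====
-- def reversal_block_scores(trial_scores):
--     """Table-then-pivot reimplementation: compute all ten block counts in one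
--     comprehension, locate the first block index >= 2 reaching 7 correct, and
--     fill everything after it with the cap of 8."""
--     trial_scores = list(trial_scores)
--     counts = [trial_scores[i * 8:(i + 1) * 8].count(0) for i in range(10)]
--     t = next((j for j in range(2, 10) if counts[j] >= 7), None)
--     if t is None:
--         return counts
--     return counts[:t + 1] + [8] * (9 - t)
-- ===== Notes on version B (the rewrite author's own statement) =====
-- stated objective: alternative
-- what changed: Replaced A's stateful carry-forward loop (which reads the previously appended block score to decide forcing) with a two-pass table-then-pivot decomposition: build all ten raw block counts in one comprehension, find the first block index >= 2 with >= 7 correct, and fill everything after it with the cap of 8.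
import Mathlib
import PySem

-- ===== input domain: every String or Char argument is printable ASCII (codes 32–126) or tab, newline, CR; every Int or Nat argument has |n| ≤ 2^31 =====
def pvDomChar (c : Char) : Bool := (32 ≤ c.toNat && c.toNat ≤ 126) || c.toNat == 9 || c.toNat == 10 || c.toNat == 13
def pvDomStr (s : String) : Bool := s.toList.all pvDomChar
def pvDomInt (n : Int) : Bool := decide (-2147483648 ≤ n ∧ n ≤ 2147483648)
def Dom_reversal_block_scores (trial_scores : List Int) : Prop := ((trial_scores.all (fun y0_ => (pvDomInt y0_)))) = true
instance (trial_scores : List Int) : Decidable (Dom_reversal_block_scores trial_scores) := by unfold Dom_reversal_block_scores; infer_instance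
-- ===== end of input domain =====

-- B replaces A's carry-forward loop by a two-pass table-then-pivot decomposition
-- (compute the ten raw block counts, find the first pivot block ≥ 7 after index 1,
-- fill the tail with 8s); same results, alternative structure.

-- ===== PORT A =====
def reversal_block_scores (trial_scores : List Int) : List Int :=
  (PySem.List.pyRange 0 10 1).foldl
    (fun block_scores i =>
      let block := PySem.List.slice trial_scores (some (i * 8)) (some ((i + 1) * 8))
      let correct_trials : Int := (PySem.List.count block 0 : Int)
      -- 'block_scores[-1]' is only read under the guard i > 2, where block_scores is nonempty,
      -- so the total pyGetD form is exact
      if i > 2 ∧ PySem.List.pyGetD block_scores (-1) 0 ≥ 7 then block_scores ++ [8]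
      else block_scores ++ [correct_trials]) []

-- ===== PORT B =====
def reversal_block_scores_alt (trial_scores : List Int) : List Int :=
  let counts := (PySem.List.pyRange 0 10 1).map (fun i =>
    (PySem.List.count (PySem.List.slice trial_scores (some (i * 8)) (some ((i + 1) * 8))) 0 : Int))
  -- next((j for j in range(2, 10) if counts[j] >= 7), None)
  match (PySem.List.pyRange 2 10 1).find?
      (fun j => decide (PySem.List.pyGetD counts j 0 ≥ 7)) with
  | none => counts
  | some t => PySem.List.slice counts (some 0) (some (t + 1)) ++ List.replicate (9 - t).toNat 8

-- ===== PRECONDITION & SPEC =====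
def Spec_reversal_block_scores (trial_scores : List Int) (out : List Int) : Prop := out = reversal_block_scores_alt trial_scores
instance (trial_scores : List Int) (out : List Int) : Decidable (Spec_reversal_block_scores trial_scores out) := by unfold Spec_reversal_block_scores; infer_instance

-- ===== CLAIM (what is proved, stated in full; the proofs are below) =====
def Claim_equal_reversal_block_scores : Prop := ∀ (trial_scores : List Int), Dom_reversal_block_scores trial_scores → Spec_reversal_block_scores trial_scores (reversal_block_scores trial_scores)

-- ===== LEMMAS AND PROOFS =====

-- The carry-forward step of A, abstracted over the per-block count function c.
def pvStepA (c : Int → Int) (bs : List Int) (i : Int) : List Int :=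
  if i > 2 ∧ PySem.List.pyGetD bs (-1) 0 ≥ 7 then bs ++ [8] else bs ++ [c i]

-- B's table-then-pivot result, abstracted over the same count function c.
def pvRhsB (c : Int → Int) : List Int :=
  let counts := ([0,1,2,3,4,5,6,7,8,9] : List Int).map c
  match ([2,3,4,5,6,7,8,9] : List Int).find?
      (fun j => decide (PySem.List.pyGetD counts j 0 ≥ 7)) with
  | none => counts
  | some t => PySem.List.slice counts (some 0) (some (t + 1)) ++ List.replicate (9 - t).toNat 8

-- Core equivalence over an arbitrary count function: case split on the pivot position.
set_option maxHeartbeats 4000000 in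
theorem pv_key (c : Int → Int) :
    ([0,1,2,3,4,5,6,7,8,9] : List Int).foldl (pvStepA c) [] = pvRhsB c := by
  by_cases h2 : (7:Int) ≤ c 2
  · simp [pvStepA, pvRhsB, PySem.List.pyGetD, PySem.List.pyGet?, PySem.List.pyIdx?,
      PySem.List.slice, PySem.List.clampIdx, h2]
  · by_cases h3 : (7:Int) ≤ c 3
    · simp [pvStepA, pvRhsB, PySem.List.pyGetD, PySem.List.pyGet?, PySem.List.pyIdx?,
        PySem.List.slice, PySem.List.clampIdx, h2, h3]
    · by_cases h4 : (7:Int) ≤ c 4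
      · simp [pvStepA, pvRhsB, PySem.List.pyGetD, PySem.List.pyGet?, PySem.List.pyIdx?,
          PySem.List.slice, PySem.List.clampIdx, h2, h3, h4]
      · by_cases h5 : (7:Int) ≤ c 5
        · simp [pvStepA, pvRhsB, PySem.List.pyGetD, PySem.List.pyGet?, PySem.List.pyIdx?,
            PySem.List.slice, PySem.List.clampIdx, h2, h3, h4, h5]
        · by_cases h6 : (7:Int) ≤ c 6
          · simp [pvStepA, pvRhsB, PySem.List.pyGetD, PySem.List.pyGet?, PySem.List.pyIdx?,
              PySem.List.slice, PySem.List.clampIdx, h2, h3, h4, h5, h6]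
          · by_cases h7 : (7:Int) ≤ c 7
            · simp [pvStepA, pvRhsB, PySem.List.pyGetD, PySem.List.pyGet?, PySem.List.pyIdx?,
                PySem.List.slice, PySem.List.clampIdx, h2, h3, h4, h5, h6, h7]
            · by_cases h8 : (7:Int) ≤ c 8
              · simp [pvStepA, pvRhsB, PySem.List.pyGetD, PySem.List.pyGet?, PySem.List.pyIdx?,
                  PySem.List.slice, PySem.List.clampIdx, h2, h3, h4, h5, h6, h7, h8]
              · by_cases h9 : (7:Int) ≤ c 9
                · simp [pvStepA, pvRhsB, PySem.List.pyGetD, PySem.List.pyGet?, PySem.List.pyIdx?,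
                    PySem.List.slice, PySem.List.clampIdx, h2, h3, h4, h5, h6, h7, h8, h9]
                · simp [pvStepA, pvRhsB, PySem.List.pyGetD, PySem.List.pyGet?, PySem.List.pyIdx?, h2, h3, h4, h5, h6, h7, h8, h9]

-- ===== VERDICT (by name: the statement is the Claim_ definition above) =====
theorem reversal_block_scores_spec : Claim_equal_reversal_block_scores := by
  intro trial_scores _
  unfold Spec_reversal_block_scores reversal_block_scores reversal_block_scores_alt
  have hr : PySem.List.pyRange 0 10 1 = ([0,1,2,3,4,5,6,7,8,9] : List Int) := by decide
  have hr2 : PySem.List.pyRange 2 10 1 = ([2,3,4,5,6,7,8,9] : List Int) := by decide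
  rw [hr, hr2]
  exact pv_key (fun i =>
    (PySem.List.count (PySem.List.slice trial_scores (some (i * 8)) (some ((i + 1) * 8))) 0 : Int))
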